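-- pv_equiv track=rewrite | github.com/sueszli/vector-database-benchmark | dataset/python-mutated/_tokenize.py | _get_normal_name
-- ===== SOURCE A (Python) =====
-- def _get_normal_name(orig_enc):
--     if False:
--         while True:
--             i = 10
--     'Imitates get_normal_name in tokenizer.c.'
--     enc = orig_enc[:12].lower().replace('_', '-')
--     if enc == 'utf-8' or enc.startswith('utf-8-'):
--         return 'utf-8'
--     if enc in ('latin-1', 'iso-8859-1', 'iso-latin-1') or enc.startswith(('latin-1-', 'iso-8859-1-', 'iso-latin-1-')):
--         return 'iso-8859-1'
--     return orig_enc
-- ===== SOURCE B (Python) =====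
-- def _get_normal_name(orig_enc):
--     parts = orig_enc[:12].lower().replace('_', '-').split('-')
--     if parts[:2] == ['utf', '8']:
--         return 'utf-8'
--     if parts[:2] == ['latin', '1'] or parts[:3] in (['iso', '8859', '1'], ['iso', 'latin', '1']):
--         return 'iso-8859-1'
--     return orig_enc
-- ===== Notes on version B (the rewrite author's own statement) =====
-- stated objective: alternative
-- what changed: B tokenizes the normalized lowercased 12-char prefix at dashes and recognizes each encoding by comparing the leading token lists (utf/8, latin/1, iso/8859/1, iso/latin/1) instead of A's chain of equality and startswith string tests.
import Mathlib
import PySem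

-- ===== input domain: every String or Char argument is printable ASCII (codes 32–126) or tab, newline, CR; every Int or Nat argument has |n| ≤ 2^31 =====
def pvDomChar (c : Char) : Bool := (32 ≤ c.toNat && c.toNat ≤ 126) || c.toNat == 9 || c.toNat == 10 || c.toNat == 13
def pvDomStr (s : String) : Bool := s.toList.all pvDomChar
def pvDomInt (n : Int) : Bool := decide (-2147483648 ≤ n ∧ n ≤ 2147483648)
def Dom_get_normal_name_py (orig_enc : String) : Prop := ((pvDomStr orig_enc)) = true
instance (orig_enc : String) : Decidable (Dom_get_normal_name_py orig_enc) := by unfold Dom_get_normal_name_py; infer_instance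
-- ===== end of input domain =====

-- B recognizes the encodings by splitting the normalized prefix at dashes and comparing
-- the leading token lists, instead of A's equality/startswith string tests
-- (objective: alternative); return values are identical.

-- ===== PORT A =====
def get_normal_name_py (orig_enc : String) : String :=
  let enc := PySem.Str.replace (PySem.Str.lower (PySem.Str.slice orig_enc none (some 12))) "_" "-"
  if enc == "utf-8" || PySem.Str.startswith enc "utf-8-" then "utf-8"
  else if (enc == "latin-1" || enc == "iso-8859-1" || enc == "iso-latin-1")
          || (PySem.Str.startswith enc "latin-1-" || PySem.Str.startswith enc "iso-8859-1-"
              || PySem.Str.startswith enc "iso-latin-1-") then "iso-8859-1"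
  else orig_enc

-- ===== PORT B =====
def get_normal_name_py_alt (orig_enc : String) : String :=
  let parts := PySem.Chars.splitOn
    (PySem.Str.replace (PySem.Str.lower (PySem.Str.slice orig_enc none (some 12))) "_" "-").toList
    "-".toList
  if parts.take 2 == ["utf".toList, "8".toList] then "utf-8"
  else if parts.take 2 == ["latin".toList, "1".toList]
          || parts.take 3 == ["iso".toList, "8859".toList, "1".toList]
          || parts.take 3 == ["iso".toList, "latin".toList, "1".toList] then "iso-8859-1"
  else orig_enc

-- ===== PRECONDITION & SPEC =====
def Spec_get_normal_name_py (orig_enc : String) (out : String) : Prop := out = get_normal_name_py_alt orig_enc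
instance (orig_enc : String) (out : String) : Decidable (Spec_get_normal_name_py orig_enc out) := by unfold Spec_get_normal_name_py; infer_instance

-- ===== CLAIM (what is proved, stated in full; the proofs are below) =====
def Claim_equal_get_normal_name_py : Prop := ∀ (orig_enc : String), Dom_get_normal_name_py orig_enc → Spec_get_normal_name_py orig_enc (get_normal_name_py orig_enc)

-- ===== LEMMAS AND PROOFS =====

-- reference single-separator split, used to reason about PySem.Chars.splitOn · ['-']
def pvSp : List Char → List (List Char)
  | [] => [[]]
  | c :: rest =>
      if c = '-' then [] :: pvSp rest
      else match pvSp rest with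
           | [] => [[c]]
           | h :: t => (c :: h) :: t

theorem pvSp_ne_nil (cs : List Char) : pvSp cs ≠ [] := by
  induction cs with
  | nil => simp [pvSp]
  | cons c rest ih =>
    simp only [pvSp]
    split
    · simp
    · cases hsp : pvSp rest with
      | nil => exact absurd hsp ih
      | cons h t => simp

theorem pvModifyHead_id {α : Type} (xs : List (List α)) : xs.modifyHead (fun h => h) = xs := by
  cases xs <;> rfl

theorem pvGo_spec (fuel : Nat) : ∀ (l cur : List Char) (acc : List (List Char)), l.length < fuel →
    PySem.Chars.splitOn.go ['-'] fuel l cur acc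
      = acc.reverse ++ ((pvSp l).modifyHead (fun h => cur.reverse ++ h)) := by
  induction fuel with
  | zero => intro l cur acc h; omega
  | succ n ih =>
    intro l cur acc h
    cases l with
    | nil => simp [PySem.Chars.splitOn.go, pvSp]
    | cons c rest =>
      by_cases hc : c = '-'
      · subst hc
        have : PySem.Chars.splitOn.go ['-'] (n+1) ('-'::rest) cur acc
            = PySem.Chars.splitOn.go ['-'] n rest [] (cur.reverse :: acc) := by
          simp [PySem.Chars.splitOn.go, List.isPrefixOf]
        rw [this, ih rest [] (cur.reverse :: acc) (by simpa using Nat.lt_of_succ_lt_succ h)]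
        simp [pvSp, pvModifyHead_id]
      · have : PySem.Chars.splitOn.go ['-'] (n+1) (c::rest) cur acc
            = PySem.Chars.splitOn.go ['-'] n rest (c :: cur) acc := by
          simp [PySem.Chars.splitOn.go, List.isPrefixOf, Ne.symm hc]
        rw [this, ih rest (c :: cur) acc (by simpa using Nat.lt_of_succ_lt_succ h)]
        cases hsp : pvSp rest with
        | nil => exact absurd hsp (pvSp_ne_nil rest)
        | cons hh tt => simp [pvSp, hc, hsp]

theorem pvSplitOn_eq_sp (cs : List Char) : PySem.Chars.splitOn cs ['-'] = pvSp cs := by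
  unfold PySem.Chars.splitOn
  rw [pvGo_spec (cs.length + 1) cs [] [] (by omega)]
  simp [pvModifyHead_id]

theorem pvSp_eq_cons_iff : ∀ (t : List Char), '-' ∉ t → ∀ (cs : List Char) (l : List (List Char)),
    (pvSp cs = t :: l ↔ ((cs = t ∧ l = []) ∨ ∃ r, cs = t ++ '-' :: r ∧ pvSp r = l)) := by
  intro t
  induction t with
  | nil =>
    intro _ cs l
    cases cs with
    | nil => simp [pvSp]
    | cons c rest =>
      by_cases hc : c = '-'
      · subst hc; simp [pvSp]
      · cases hsp : pvSp rest with
        | nil => exact absurd hsp (pvSp_ne_nil rest)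
        | cons hh tt => simp [pvSp, hc, hsp]
  | cons a t' ih =>
    intro hmem cs l
    have ha : a ≠ '-' := fun h => hmem (by simp [h])
    have hmem' : '-' ∉ t' := fun h => hmem (by simp [h])
    cases cs with
    | nil => simp [pvSp]
    | cons c rest =>
      by_cases hc : c = '-'
      · subst hc
        simp [pvSp, Ne.symm ha]
      · cases hsp : pvSp rest with
        | nil => exact absurd hsp (pvSp_ne_nil rest)
        | cons hh tt =>
          have hgoal : pvSp (c :: rest) = (c :: hh) :: tt := by simp [pvSp, hc, hsp]
          rw [hgoal]
          constructor
          · intro hEq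
            obtain ⟨h1, h2⟩ := List.cons_eq_cons.mp hEq
            obtain ⟨hca, hht⟩ := List.cons_eq_cons.mp h1
            have hres : pvSp rest = t' :: l := by rw [hsp, hht, h2]
            rcases (ih hmem' rest l).mp hres with ⟨hrt, hl⟩ | ⟨r, hrt, hr⟩
            · exact Or.inl ⟨by rw [hca, hrt], hl⟩
            · exact Or.inr ⟨r, by rw [hca, hrt]; rfl, hr⟩
          · rintro (⟨hEq, rfl⟩ | ⟨r, hEq, hr⟩)
            · obtain ⟨hca, hrt⟩ := List.cons_eq_cons.mp hEq
              have h5 : pvSp rest = t' :: [] := by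
                rw [hrt]; exact (ih hmem' t' []).mpr (Or.inl ⟨rfl, rfl⟩)
              rw [hsp] at h5
              obtain ⟨h6, h7⟩ := List.cons_eq_cons.mp h5
              rw [hca, h6, h7]
            · rw [List.cons_append] at hEq
              obtain ⟨hca, hrt⟩ := List.cons_eq_cons.mp hEq
              have h5 : pvSp rest = t' :: l := by
                rw [hrt]; exact (ih hmem' _ l).mpr (Or.inr ⟨r, rfl, hr⟩)
              rw [hsp] at h5
              obtain ⟨h6, h7⟩ := List.cons_eq_cons.mp h5
              rw [hca, h6, h7]

theorem pvTake_two {α : Type} (xs : List α) (a b : α) :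
    xs.take 2 = [a, b] ↔ ∃ l, xs = a :: b :: l := by
  cases xs with
  | nil => simp
  | cons x xs =>
    cases xs with
    | nil => simp
    | cons y ys => simp [List.take]

theorem pvTake_three {α : Type} (xs : List α) (a b c : α) :
    xs.take 3 = [a, b, c] ↔ ∃ l, xs = a :: b :: c :: l := by
  cases xs with
  | nil => simp
  | cons x xs =>
    cases xs with
    | nil => simp
    | cons y ys =>
      cases ys with
      | nil => simp
      | cons z zs => simp [List.take]

theorem pvSp_head_iff (t : List Char) (ht : '-' ∉ t) (cs : List Char) :
    (∃ l, pvSp cs = t :: l) ↔ (cs = t ∨ ∃ r, cs = t ++ '-' :: r) := by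
  constructor
  · rintro ⟨l, hl⟩
    rcases (pvSp_eq_cons_iff t ht cs l).mp hl with ⟨rfl, _⟩ | ⟨r, rfl, _⟩
    · exact Or.inl rfl
    · exact Or.inr ⟨r, rfl⟩
  · rintro (rfl | ⟨r, rfl⟩)
    · exact ⟨[], (pvSp_eq_cons_iff _ ht _ _).mpr (Or.inl ⟨rfl, rfl⟩)⟩
    · exact ⟨pvSp r, (pvSp_eq_cons_iff _ ht _ _).mpr (Or.inr ⟨r, rfl, rfl⟩)⟩

theorem pvTake2_iff (t1 t2 : List Char) (h1 : '-' ∉ t1) (h2 : '-' ∉ t2) (cs : List Char) :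
    ((pvSp cs).take 2 = [t1, t2]) ↔
      (cs = t1 ++ '-' :: t2 ∨ (t1 ++ '-' :: t2 ++ ['-']) <+: cs) := by
  rw [pvTake_two]
  constructor
  · rintro ⟨l, hl⟩
    rcases (pvSp_eq_cons_iff t1 h1 cs _).mp hl with ⟨_, hfalse⟩ | ⟨r, rfl, hr⟩
    · exact absurd hfalse (by simp)
    · rcases (pvSp_head_iff t2 h2 r).mp ⟨l, hr⟩ with rfl | ⟨r2, rfl⟩
      · exact Or.inl rfl
      · exact Or.inr ⟨r2, by simp⟩
  · rintro (rfl | ⟨u, rfl⟩)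
    · exact ⟨[], (pvSp_eq_cons_iff t1 h1 _ _).mpr
        (Or.inr ⟨t2, rfl, (pvSp_eq_cons_iff t2 h2 t2 []).mpr (Or.inl ⟨rfl, rfl⟩)⟩)⟩
    · refine ⟨pvSp u, (pvSp_eq_cons_iff t1 h1 _ _).mpr
        (Or.inr ⟨t2 ++ '-' :: u, by simp, ?_⟩)⟩
      exact (pvSp_eq_cons_iff t2 h2 _ _).mpr (Or.inr ⟨u, rfl, rfl⟩)

theorem pvTake3_iff (t1 t2 t3 : List Char) (h1 : '-' ∉ t1) (h2 : '-' ∉ t2) (h3 : '-' ∉ t3)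
    (cs : List Char) :
    ((pvSp cs).take 3 = [t1, t2, t3]) ↔
      (cs = t1 ++ '-' :: t2 ++ '-' :: t3 ∨ (t1 ++ '-' :: t2 ++ '-' :: t3 ++ ['-']) <+: cs) := by
  rw [pvTake_three]
  constructor
  · rintro ⟨l, hl⟩
    rcases (pvSp_eq_cons_iff t1 h1 cs _).mp hl with ⟨_, hfalse⟩ | ⟨r, rfl, hr⟩
    · exact absurd hfalse (by simp)
    · rcases (pvSp_eq_cons_iff t2 h2 r _).mp hr with ⟨_, hfalse⟩ | ⟨r2, rfl, hr2⟩
      · exact absurd hfalse (by simp)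
      · rcases (pvSp_head_iff t3 h3 r2).mp ⟨l, hr2⟩ with rfl | ⟨r3, rfl⟩
        · exact Or.inl (by simp)
        · exact Or.inr ⟨r3, by simp⟩
  · rintro (hEq | ⟨u, hu⟩)
    · refine ⟨[], (pvSp_eq_cons_iff t1 h1 _ _).mpr (Or.inr ⟨t2 ++ '-' :: t3, by simpa using hEq, ?_⟩)⟩
      exact (pvSp_eq_cons_iff t2 h2 _ _).mpr
        (Or.inr ⟨t3, rfl, (pvSp_eq_cons_iff t3 h3 t3 []).mpr (Or.inl ⟨rfl, rfl⟩)⟩)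
    · refine ⟨pvSp u, (pvSp_eq_cons_iff t1 h1 _ _).mpr
        (Or.inr ⟨t2 ++ '-' :: t3 ++ '-' :: u, by simpa [List.append_assoc] using hu.symm, ?_⟩)⟩
      exact (pvSp_eq_cons_iff t2 h2 _ _).mpr (Or.inr ⟨t3 ++ '-' :: u, by simp,
        (pvSp_eq_cons_iff t3 h3 _ _).mpr (Or.inr ⟨u, rfl, rfl⟩)⟩)

theorem pvToList_inj (s t : String) : s.toList = t.toList ↔ s = t := by
  constructor
  · intro h
    have := congrArg String.ofList h
    simpa using this
  · rintro rfl; rfl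

theorem pvStartswith_iff (s p : String) :
    PySem.Str.startswith s p = true ↔ p.toList <+: s.toList := by
  rw [PySem.Str.startswith_eq, PySem.Chars.startswith_iff]

theorem pvCondUtf (enc : String) :
    ((PySem.Chars.splitOn enc.toList "-".toList).take 2 == ["utf".toList, "8".toList])
      = (enc == "utf-8" || PySem.Str.startswith enc "utf-8-") := by
  have hsep : "-".toList = ['-'] := by decide
  rw [hsep, pvSplitOn_eq_sp, Bool.eq_iff_iff]
  simp only [beq_iff_eq, Bool.or_eq_true, pvStartswith_iff]
  rw [pvTake2_iff _ _ (by decide) (by decide)]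
  have h1 : "utf".toList ++ '-' :: "8".toList = "utf-8".toList := by decide
  have h2 : "utf-8".toList ++ ['-'] = "utf-8-".toList := by decide
  rw [h1, h2, pvToList_inj]

theorem pvCondLatin (enc : String) :
    ((PySem.Chars.splitOn enc.toList "-".toList).take 2 == ["latin".toList, "1".toList])
      = (enc == "latin-1" || PySem.Str.startswith enc "latin-1-") := by
  have hsep : "-".toList = ['-'] := by decide
  rw [hsep, pvSplitOn_eq_sp, Bool.eq_iff_iff]
  simp only [beq_iff_eq, Bool.or_eq_true, pvStartswith_iff]
  rw [pvTake2_iff _ _ (by decide) (by decide)]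
  have h1 : "latin".toList ++ '-' :: "1".toList = "latin-1".toList := by decide
  have h2 : "latin-1".toList ++ ['-'] = "latin-1-".toList := by decide
  rw [h1, h2, pvToList_inj]

theorem pvCondIso8859 (enc : String) :
    ((PySem.Chars.splitOn enc.toList "-".toList).take 3 == ["iso".toList, "8859".toList, "1".toList])
      = (enc == "iso-8859-1" || PySem.Str.startswith enc "iso-8859-1-") := by
  have hsep : "-".toList = ['-'] := by decide
  rw [hsep, pvSplitOn_eq_sp, Bool.eq_iff_iff]
  simp only [beq_iff_eq, Bool.or_eq_true, pvStartswith_iff]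
  rw [pvTake3_iff _ _ _ (by decide) (by decide) (by decide)]
  have h1 : "iso".toList ++ '-' :: "8859".toList ++ '-' :: "1".toList = "iso-8859-1".toList := by decide
  have h2 : "iso-8859-1".toList ++ ['-'] = "iso-8859-1-".toList := by decide
  rw [h1, h2, pvToList_inj]

theorem pvCondIsoLatin (enc : String) :
    ((PySem.Chars.splitOn enc.toList "-".toList).take 3 == ["iso".toList, "latin".toList, "1".toList])
      = (enc == "iso-latin-1" || PySem.Str.startswith enc "iso-latin-1-") := by
  have hsep : "-".toList = ['-'] := by decide
  rw [hsep, pvSplitOn_eq_sp, Bool.eq_iff_iff]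
  simp only [beq_iff_eq, Bool.or_eq_true, pvStartswith_iff]
  rw [pvTake3_iff _ _ _ (by decide) (by decide) (by decide)]
  have h1 : "iso".toList ++ '-' :: "latin".toList ++ '-' :: "1".toList = "iso-latin-1".toList := by decide
  have h2 : "iso-latin-1".toList ++ ['-'] = "iso-latin-1-".toList := by decide
  rw [h1, h2, pvToList_inj]

-- ===== VERDICT (by name: the statement is the Claim_ definition above) =====
theorem get_normal_name_py_spec : Claim_equal_get_normal_name_py := by
  intro orig_enc _
  show get_normal_name_py orig_enc = get_normal_name_py_alt orig_enc
  simp only [get_normal_name_py, get_normal_name_py_alt]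
  rw [pvCondUtf, pvCondLatin, pvCondIso8859, pvCondIsoLatin]
  generalize (PySem.Str.replace (PySem.Str.lower (PySem.Str.slice orig_enc none (some 12))) "_" "-") = enc
  generalize (enc == "utf-8" || PySem.Str.startswith enc "utf-8-") = b1
  generalize (enc == "latin-1") = e2
  generalize (enc == "iso-8859-1") = e3
  generalize (enc == "iso-latin-1") = e4
  generalize (PySem.Str.startswith enc "latin-1-") = s2
  generalize (PySem.Str.startswith enc "iso-8859-1-") = s3
  generalize (PySem.Str.startswith enc "iso-latin-1-") = s4
  cases b1 <;> cases e2 <;> cases e3 <;> cases e4 <;> cases s2 <;> cases s3 <;> cases s4 <;> rfl
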